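-- pv_equiv track=rewrite | github.com/db-Lee/iclr2026-5078 | multigenprm/data/preprocess_noisy_data_wo_think.py | normalize_process_labels
-- ===== SOURCE A (Python) =====
-- def get_first_error_step_index(labels):
--     """Helper function to find first error position"""
--     for i, label in enumerate(labels):
--         if label == -1:
--             return i
--     return len(labels)
--
-- def normalize_process_labels(labels):
--     """
--     Normalize labels to valid process format: [1,1,1,...,-1,-1,-1,...]
--     Once we find the first -1, all subsequent labels become -1.
--     """
--     if not labels:
--         return []
--
--     normalized = labels.copy()
--     first_error_pos = get_first_error_step_index(labels)
--
--     # Make all labels after first error position become -1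
--     for i in range(len(normalized)):
--         if i < first_error_pos:
--             normalized[i] = 1
--         else:
--             normalized[i] = -1
--
--     return normalized
-- ===== SOURCE B (Python) =====
-- def normalize_process_labels(labels):
--     seen_error = False
--     out = []
--     for x in labels:
--         seen_error = seen_error or x == -1
--         out.append(-1 if seen_error else 1)
--     return out
-- ===== Notes on version B (the rewrite author's own statement) =====
-- stated objective: simpler
-- what changed: Replaces A's two-stage scheme (find the first -1 boundary, then rewrite every position by comparing its index to that boundary) with one stateful pass that carries a seen-error flag and emits -1 once the flag is set, using no indices at all.
import Mathlib
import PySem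

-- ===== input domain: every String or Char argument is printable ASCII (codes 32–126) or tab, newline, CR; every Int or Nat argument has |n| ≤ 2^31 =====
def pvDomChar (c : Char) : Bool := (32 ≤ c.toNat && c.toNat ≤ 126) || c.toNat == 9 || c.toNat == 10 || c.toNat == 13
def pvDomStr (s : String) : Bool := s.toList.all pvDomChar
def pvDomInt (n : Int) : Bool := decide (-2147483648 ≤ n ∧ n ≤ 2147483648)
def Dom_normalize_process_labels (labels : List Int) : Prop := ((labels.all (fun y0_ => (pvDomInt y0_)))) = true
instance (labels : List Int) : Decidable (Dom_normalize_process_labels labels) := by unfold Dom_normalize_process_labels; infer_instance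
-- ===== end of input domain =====

-- B replaces A's two-stage scheme (find first -1 boundary, then index-vs-boundary rewrite)
-- with one index-free stateful pass carrying a seen-error flag (objective: simpler).


-- ===== PORT A =====
-- A's helper: scan with early return of the index of the first -1, else len(labels)
def get_first_error_step_index : List Int → Int
  | [] => 0
  | x :: xs => if x = -1 then 0 else 1 + get_first_error_step_index xs

def normalize_process_labels (labels : List Int) : List Int :=
  if labels = [] then []
  else
    let first_error_pos := get_first_error_step_index labels
    -- for i in range(len(normalized)): normalized[i] = 1 if i < first_error_pos else -1
    (List.range labels.length).map (fun (i : Nat) => if (i : Int) < first_error_pos then 1 else -1)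

-- ===== PORT B =====
-- the loop: carries seen_error and emits -1 once it is set
def normalizeGo : Bool → List Int → List Int
  | _, [] => []
  | seen_error, x :: xs =>
    let s := seen_error || (x == -1)
    (if s then (-1 : Int) else 1) :: normalizeGo s xs

def normalize_process_labels_alt (labels : List Int) : List Int :=
  normalizeGo false labels

-- ===== PRECONDITION & SPEC =====
def Spec_normalize_process_labels (labels : List Int) (out : List Int) : Prop := out = normalize_process_labels_alt labels
instance (labels : List Int) (out : List Int) : Decidable (Spec_normalize_process_labels labels out) := by unfold Spec_normalize_process_labels; infer_instance

-- ===== CLAIM (what is proved, stated in full; the proofs are below) =====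
def Claim_equal_normalize_process_labels : Prop := ∀ (labels : List Int), Dom_normalize_process_labels labels → Spec_normalize_process_labels labels (normalize_process_labels labels)

-- ===== LEMMAS AND PROOFS =====

theorem normalizeGo_true (xs : List Int) : normalizeGo true xs = List.replicate xs.length (-1) := by
  induction xs with
  | nil => rfl
  | cons x xs ih => simp [normalizeGo, ih, List.replicate_succ]

theorem normalizeGo_false (xs : List Int) :
    normalizeGo false xs =
      List.replicate (xs.findIdx (· == -1)) 1 ++
      List.replicate (xs.length - xs.findIdx (· == -1)) (-1) := by
  induction xs with
  | nil => rfl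
  | cons x xs ih =>
    by_cases h : x = -1
    · simp [normalizeGo, h, List.findIdx_cons, normalizeGo_true, List.replicate_succ]
    · have hb : (x == -1) = false := by simp [h]
      have harith : xs.length + 1 - (xs.findIdx (· == -1) + 1) = xs.length - xs.findIdx (· == -1) := by
        omega
      simp only [normalizeGo, hb, Bool.false_or, List.findIdx_cons, cond_false, ih,
        List.length_cons, harith, List.replicate_succ, List.cons_append, Bool.false_eq_true,
        if_false]

theorem first_error_eq_findIdx (labels : List Int) :
    get_first_error_step_index labels = (labels.findIdx (· == -1) : Int) := by
  induction labels with
  | nil => simp [get_first_error_step_index]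
  | cons x xs ih =>
    simp only [get_first_error_step_index, List.findIdx_cons]
    by_cases h : x = -1
    · simp [h]
    · have hb : (x == -1) = false := by simp [h]
      simp only [hb, cond_false, ih, if_neg h]
      push_cast
      ring

theorem map_range_eq_replicate (n k : Nat) (hk : k ≤ n) :
    (List.range n).map (fun (i : Nat) => if (i : Int) < (k : Int) then (1:Int) else -1)
      = List.replicate k 1 ++ List.replicate (n - k) (-1) := by
  apply List.ext_getElem
  · simp only [List.length_map, List.length_range, List.length_append, List.length_replicate]
    omega
  · intro i h1 h2
    rw [List.getElem_map, List.getElem_range]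
    by_cases hik : i < k
    · rw [List.getElem_append_left (by simp only [List.length_replicate]; omega)]
      rw [List.getElem_replicate, if_pos (by exact_mod_cast hik)]
    · rw [List.getElem_append_right (by simp only [List.length_replicate]; omega)]
      rw [List.getElem_replicate, if_neg (by simpa using hik)]

-- ===== VERDICT (by name: the statement is the Claim_ definition above) =====
theorem normalize_process_labels_spec : Claim_equal_normalize_process_labels := by
  intro labels _
  unfold Spec_normalize_process_labels normalize_process_labels normalize_process_labels_alt
  by_cases h : labels = []
  · simp [h, normalizeGo]
  · simp only [h, if_false, first_error_eq_findIdx, normalizeGo_false]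
    exact map_range_eq_replicate _ _ (List.findIdx_le_length)
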